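-- pv_equiv track=rewrite | github.com/perlinm/rey_research | entropy/entropy_methods.py | primary_subsystems
-- ===== SOURCE A (Python) =====
-- def primary_subsystems(system):
--     systems = []
--     start_idx = 0
--     while start_idx < len(system):
--         if system[start_idx] == " ":
--             start_idx += 1
--             continue
--         end_idx = start_idx + 1
--         while end_idx < len(system) and not system[end_idx].isalpha():
--             end_idx += 1
--         systems.append(system[start_idx:end_idx])
--         start_idx = end_idx
--     return set(systems)
-- ===== SOURCE B (Python) =====
-- def primary_subsystems(system):
--     out = []
--     cur = None  # current token; None until the first non-space character
--     for ch in system: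
--         if cur is None:
--             if ch != " ":
--                 cur = ch
--         elif ch.isalpha():
--             out.append(cur)
--             cur = ch
--         else:
--             cur += ch
--     if cur is not None:
--         out.append(cur)
--     return set(out)
-- ===== Notes on version B (the rewrite author's own statement) =====
-- stated objective: simpler
-- what changed: Replaces A's nested two-pointer index scan with string slicing by a single flat pass over the characters that keeps the current token in an accumulator (None until the first non-space char) and flushes it when an alphabetic character starts the next token.
import Mathlib
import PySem

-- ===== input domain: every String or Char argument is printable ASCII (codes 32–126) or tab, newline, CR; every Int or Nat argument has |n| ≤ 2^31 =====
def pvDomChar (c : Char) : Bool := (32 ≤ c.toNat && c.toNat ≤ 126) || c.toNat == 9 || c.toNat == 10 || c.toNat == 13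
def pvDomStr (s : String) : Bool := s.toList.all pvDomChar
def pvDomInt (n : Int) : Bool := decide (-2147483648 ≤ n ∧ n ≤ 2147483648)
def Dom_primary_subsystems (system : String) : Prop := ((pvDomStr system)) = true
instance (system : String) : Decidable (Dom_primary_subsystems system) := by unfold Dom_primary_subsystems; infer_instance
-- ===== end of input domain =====

-- B replaces A's two-pointer index-and-slice scan with one flat accumulator pass (objective: simpler).

-- ===== PORT A =====
-- inner while loop: 'while end_idx < len(system) and not system[end_idx].isalpha(): end_idx += 1'
def pvA_end (cs : List Char) (e : Nat) : Nat :=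
  if h : e < cs.length then
    if PySem.Chars.isalpha cs[e] then e else pvA_end cs (e + 1)
  else e
termination_by cs.length - e

-- needed for the termination of pvA_loop: the inner loop never moves left
theorem pvA_end_ge (cs : List Char) (e : Nat) : e ≤ pvA_end cs e := by
  unfold pvA_end
  split
  · split
    · exact Nat.le_refl e
    · exact Nat.le_trans (Nat.le_succ e) (pvA_end_ge cs (e + 1))
  · exact Nat.le_refl e
termination_by cs.length - e

-- outer while loop over start_idx; tokens kept as List Char, turned into String at the end;
-- system[start_idx:end_idx] with 0 ≤ start_idx ≤ end_idx is (drop start).take (end - start) (PySem.List.slice_natCast)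
def pvA_loop (cs : List Char) (s : Nat) : List (List Char) :=
  if h : s < cs.length then
    if cs[s] == ' ' then pvA_loop cs (s + 1)
    else
      let e := pvA_end cs (s + 1)
      ((cs.drop s).take (e - s)) :: pvA_loop cs e
  else []
termination_by cs.length - s
decreasing_by
  · omega
  · have := pvA_end_ge cs (s + 1); omega

def primary_subsystems (system : String) : List String :=
  (PySem.Set.ofList (pvA_loop system.toList 0)).map (fun t => String.ofList t)

-- ===== PORT B =====
-- one step of B's flat for-loop; state = (out, cur), cur = none until the first non-space char
def pvB_step (st : List (List Char) × Option (List Char)) (ch : Char) :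
    List (List Char) × Option (List Char) :=
  match st with
  | (out, none) => if ch == ' ' then (out, none) else (out, some [ch])
  | (out, some cur) =>
      if PySem.Chars.isalpha ch then (out ++ [cur], some [ch]) else (out, some (cur ++ [ch]))

-- the trailing 'if cur is not None: out.append(cur)'
def pvB_finish (st : List (List Char) × Option (List Char)) : List (List Char) :=
  match st with
  | (out, none) => out
  | (out, some cur) => out ++ [cur]

def primary_subsystems_alt (system : String) : List String :=
  (PySem.Set.ofList (pvB_finish (system.toList.foldl pvB_step ([], none)))).map
    (fun t => String.ofList t)

-- ===== PRECONDITION & SPEC =====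
def Spec_primary_subsystems (system : String) (out : List String) : Prop := out = primary_subsystems_alt system
instance (system : String) (out : List String) : Decidable (Spec_primary_subsystems system out) := by unfold Spec_primary_subsystems; infer_instance

-- ===== CLAIM (what is proved, stated in full; the proofs are below) =====
def Claim_equal_primary_subsystems : Prop := ∀ (system : String), Dom_primary_subsystems system → Spec_primary_subsystems system (primary_subsystems system)

-- ===== LEMMAS AND PROOFS =====

-- common tokenization both loops compute: skip a space, otherwise one char plus its non-alpha run
def pvTok : List Char → List (List Char)
  | [] => []
  | c :: rest =>
    if c == ' ' then pvTok rest
    else (c :: rest.takeWhile (fun d => !PySem.Chars.isalpha d)) ::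
      pvTok (rest.dropWhile (fun d => !PySem.Chars.isalpha d))
termination_by l => l.length
decreasing_by
  · simp
  · exact Nat.lt_succ_of_le (List.length_dropWhile_le _ _)

theorem takeWhile_drop (p : Char → Bool) (l : List Char) :
    l.take (l.takeWhile p).length = l.takeWhile p := by
  induction l with
  | nil => rfl
  | cons c t ih => by_cases h : p c <;> simp [h, ih]

theorem dropWhile_drop (p : Char → Bool) (l : List Char) :
    l.drop (l.takeWhile p).length = l.dropWhile p := by
  induction l with
  | nil => rfl
  | cons c t ih => by_cases h : p c <;> simp [h, ih]

theorem pvA_end_eq (cs : List Char) (e : Nat) :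
    pvA_end cs e = e + ((cs.drop e).takeWhile (fun d => !PySem.Chars.isalpha d)).length := by
  unfold pvA_end
  split
  · rename_i h
    have hd : cs.drop e = cs[e] :: cs.drop (e + 1) := List.drop_eq_getElem_cons h
    split
    · rename_i ha
      have ht : (cs.drop e).takeWhile (fun d => !PySem.Chars.isalpha d) = [] := by
        rw [hd, List.takeWhile_cons]; simp [ha]
      rw [ht]; simp
    · rename_i ha
      simp only [Bool.not_eq_true] at ha
      have ht : (cs.drop e).takeWhile (fun d => !PySem.Chars.isalpha d)
          = cs[e] :: (cs.drop (e + 1)).takeWhile (fun d => !PySem.Chars.isalpha d) := by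
        rw [hd, List.takeWhile_cons]; simp [ha]
      rw [pvA_end_eq cs (e + 1), ht, List.length_cons]
      omega
  · rename_i h
    rw [List.drop_eq_nil_of_le (by omega)]
    simp
termination_by cs.length - e

theorem pvA_loop_eq (cs : List Char) (s : Nat) : pvA_loop cs s = pvTok (cs.drop s) := by
  unfold pvA_loop
  split
  · rename_i h
    have hd : cs.drop s = cs[s] :: cs.drop (s + 1) := List.drop_eq_getElem_cons h
    rw [hd, pvTok]
    by_cases hsp : cs[s] == ' '
    · rw [if_pos hsp, if_pos hsp]
      exact pvA_loop_eq cs (s + 1)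
    · rw [if_neg hsp, if_neg hsp]
      have he := pvA_end_eq cs (s + 1)
      have hL : pvA_end cs (s + 1) - s
          = ((cs.drop (s + 1)).takeWhile (fun d => !PySem.Chars.isalpha d)).length + 1 := by
        omega
      show List.take (pvA_end cs (s + 1) - s) (cs[s] :: cs.drop (s + 1))
            :: pvA_loop cs (pvA_end cs (s + 1))
          = (cs[s] :: (cs.drop (s + 1)).takeWhile (fun d => !PySem.Chars.isalpha d)) ::
            pvTok ((cs.drop (s + 1)).dropWhile (fun d => !PySem.Chars.isalpha d))
      congr 1
      · rw [hL, List.take_succ_cons, takeWhile_drop]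
      · rw [pvA_loop_eq cs (pvA_end cs (s + 1)), he, ← List.drop_drop, dropWhile_drop]
  · rename_i h
    rw [List.drop_eq_nil_of_le (by omega)]
    simp [pvTok]
termination_by cs.length - s
decreasing_by
  · omega
  · have := pvA_end_ge cs (s + 1); omega

theorem isalpha_ne_space {c : Char} (h : PySem.Chars.isalpha c = true) : (c == ' ') = false := by
  by_contra hc
  simp only [Bool.not_eq_false, beq_iff_eq] at hc
  subst hc
  exact absurd h (by decide)

theorem pvB_run_some (rest : List Char) (out : List (List Char)) (cur : List Char) :
    pvB_finish (rest.foldl pvB_step (out, some cur)) =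
      out ++ (cur ++ rest.takeWhile (fun d => !PySem.Chars.isalpha d)) ::
        pvTok (rest.dropWhile (fun d => !PySem.Chars.isalpha d)) := by
  induction rest generalizing out cur with
  | nil => simp [pvB_finish, pvTok]
  | cons d t ih =>
    by_cases ha : PySem.Chars.isalpha d
    · simp only [List.foldl_cons, pvB_step, ha, if_true, ih,
        List.takeWhile_cons, List.dropWhile_cons, Bool.not_true, Bool.false_eq_true, if_false]
      rw [pvTok]
      simp [isalpha_ne_space ha]
    · simp only [Bool.not_eq_true] at ha
      simp [pvB_step, ha, ih]

theorem pvB_run_none (cs : List Char) (out : List (List Char)) :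
    pvB_finish (cs.foldl pvB_step (out, none)) = out ++ pvTok cs := by
  induction cs generalizing out with
  | nil => simp [pvB_finish, pvTok]
  | cons c t ih =>
    by_cases hsp : c == ' '
    · simp only [List.foldl_cons, pvB_step, hsp, if_true, ih]
      rw [pvTok]; simp [hsp]
    · simp only [List.foldl_cons, pvB_step, hsp, Bool.false_eq_true, if_false, pvB_run_some]
      rw [pvTok]; simp [hsp]

-- ===== VERDICT (by name: the statement is the Claim_ definition above) =====
theorem primary_subsystems_spec : Claim_equal_primary_subsystems := by
  intro system _
  unfold Spec_primary_subsystems primary_subsystems primary_subsystems_alt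
  rw [pvB_run_none, pvA_loop_eq]
  simp
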